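-- pv_equiv track=rewrite | github.com/cofemei/fcitx5-whispercpp | tools/configure_fcitx5.py | ensure_list_first
-- ===== SOURCE A (Python) =====
-- def find_section(lines: list[str], section: str) -> tuple[int, int]:
--     """Return (section_start, section_end) indices, or (-1, len(lines)) if not found."""
--     header = f"[{section}]"
--     section_start = -1
--     section_end = len(lines)
--     for i, line in enumerate(lines):
--         if line.strip() == header:
--             section_start = i
--             break
--     if section_start >= 0:
--         for i in range(section_start + 1, len(lines)):
--             if lines[i].startswith("[") and lines[i].endswith("]"):
--                 section_end = i
--                 break
--     return section_start, section_end
--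
-- def ensure_list_first(lines: list[str], section: str, value: str) -> list[str]:
--     header = f"[{section}]"
--     section_start, section_end = find_section(lines, section)
--
--     if section_start == -1:
--         if lines and lines[-1].strip():
--             lines.append("")
--         lines.extend([header, f"0={value}"])
--         return lines
--
--     replaced = False
--     remove_indices: list[int] = []
--     for i in range(section_start + 1, section_end):
--         stripped = lines[i].strip()
--         if not stripped or stripped.startswith("#"):
--             continue
--         if stripped.startswith("0="):
--             lines[i] = f"0={value}"
--             replaced = True
--             continue
--         # Keep only one effective hotkey entry in this list section.
--         if stripped.split("=", 1)[0].isdigit():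
--             remove_indices.append(i)
--
--     for i in reversed(remove_indices):
--         del lines[i]
--
--     if not replaced:
--         lines.insert(section_start + 1, f"0={value}")
--     return lines
-- ===== SOURCE B (Python) =====
-- def ensure_list_first(lines: list[str], section: str, value: str) -> list[str]:
--     """Single forward pass building the result list; mutates `lines` in place via lines[:]."""
--     header = f"[{section}]"
--     out = []
--     it = iter(lines)
--     found = False
--     for line in it:
--         out.append(line)
--         if line.strip() == header:
--             found = True
--             break
--     if not found:
--         if out and out[-1].strip():
--             out.append("")
--         out.extend([header, f"0={value}"])
--         lines[:] = out
--         return lines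
--     insert_at = len(out)
--     replaced = False
--     in_section = True
--     for line in it:
--         if in_section and line.startswith("[") and line.endswith("]"):
--             in_section = False
--         if not in_section:
--             out.append(line)
--             continue
--         stripped = line.strip()
--         if not stripped or stripped.startswith("#"):
--             out.append(line)
--         elif stripped.startswith("0="):
--             out.append(f"0={value}")
--             replaced = True
--         elif stripped.split("=", 1)[0].isdigit():
--             pass
--         else:
--             out.append(line)
--     if not replaced:
--         out.insert(insert_at, f"0={value}")
--     lines[:] = out
--     return lines
-- ===== Notes on version B (the rewrite author's own statement) =====
-- stated objective: simpler
-- what changed: A finds the section by scanning twice with index arithmetic, then mutates in place (sets at indices, collects remove-indices, deletes them in reverse, positional insert); B builds the result in one forward pass, copying lines up to the header, rewriting/keeping/dropping each section line as it goes, copying the tail, and splicing the 0= entry only if no replacement happened.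
import Mathlib
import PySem

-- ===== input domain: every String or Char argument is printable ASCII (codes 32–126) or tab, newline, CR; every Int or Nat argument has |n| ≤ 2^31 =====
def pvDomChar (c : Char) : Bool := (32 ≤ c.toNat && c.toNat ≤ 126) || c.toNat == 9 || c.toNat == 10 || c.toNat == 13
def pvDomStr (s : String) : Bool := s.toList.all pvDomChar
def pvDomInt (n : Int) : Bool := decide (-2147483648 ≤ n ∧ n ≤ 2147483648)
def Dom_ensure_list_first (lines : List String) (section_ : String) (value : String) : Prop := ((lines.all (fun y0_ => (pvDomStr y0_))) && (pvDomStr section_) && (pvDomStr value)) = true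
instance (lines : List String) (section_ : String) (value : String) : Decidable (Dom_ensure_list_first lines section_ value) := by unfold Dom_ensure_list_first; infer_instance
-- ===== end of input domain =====

-- B rebuilds the list in ONE forward pass (a simpler decomposition) instead of A's
-- index bookkeeping with in-place sets, a collected remove-index list, reversed
-- deletions and a positional insert; only the RETURN value is proved equal here
-- (both Pythons also mutate `lines` in place, B via lines[:] = result).

-- ===== PORT A =====
-- per-line tests of A's main loop (the same literal expressions appear in B)
def pvBracket (l : String) : Bool := PySem.Str.startswith l "[" && PySem.Str.endswith l "]"

def pvSkip (l : String) : Bool := PySem.Str.strip l == "" || PySem.Str.startswith (PySem.Str.strip l) "#"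

def pvZero (l : String) : Bool := PySem.Str.startswith (PySem.Str.strip l) "0="

-- stripped.split("=", 1)[0].isdigit()
def pvDig (l : String) : Bool :=
  match PySem.Str.splitMax? (PySem.Str.strip l) "=" 1 with
  | some (k :: _) => PySem.Str.strIsdigit k
  | _ => false

-- first loop of find_section: for i, line in enumerate(lines): break at the header line
def fsStart (header : String) : List String → Int → Int
  | [], _ => -1
  | l :: ls, i => if PySem.Str.strip l == header then i else fsStart header ls (i + 1)

-- second loop of find_section: for i in range(section_start+1, len(lines)): break at the first '[...]' line
def fsEnd (lines : List String) : List Int → Int → Int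
  | [], dflt => dflt
  | i :: rest, dflt =>
    if pvBracket (PySem.List.pyGetD lines i "") then i else fsEnd lines rest dflt

def find_section (lines : List String) (section_ : String) : Int × Int :=
  let header := "[" ++ section_ ++ "]"
  let section_start := fsStart header lines 0
  let section_end : Int :=
    if section_start ≥ 0 then
      fsEnd lines (PySem.List.pyRange (section_start + 1) (PySem.List.len lines) 1) (PySem.List.len lines)
    else PySem.List.len lines
  (section_start, section_end)

-- body of A's main loop (reads, and possibly sets, lines[i]; i is always in range)
def stepA (value : String) (st : List String × Bool × List Int) (i : Int) : List String × Bool × List Int :=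
  let l := PySem.List.pyGetD st.1 i ""
  if pvSkip l then st
  else if pvZero l then (PySem.List.pySetD st.1 i ("0=" ++ value), true, st.2.2)
  else if pvDig l then (st.1, st.2.1, st.2.2 ++ [i])
  else st

-- del lines[i] (the index is always valid when A executes it)
def delStep (acc : List String) (i : Int) : List String :=
  match PySem.List.pop? acc i with
  | some r => r.2
  | none => acc

def ensure_list_first (lines : List String) (section_ : String) (value : String) : List String :=
  let header := "[" ++ section_ ++ "]"
  let se := find_section lines section_
  let section_start := se.1
  let section_end := se.2
  if section_start == -1 then
    let lines1 :=
      if (!lines.isEmpty) && !(PySem.Str.strip (PySem.List.pyGetD lines (-1) "") == "") then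
        lines ++ [""]
      else lines
    lines1 ++ [header, "0=" ++ value]
  else
    let st := (PySem.List.pyRange (section_start + 1) section_end 1).foldl (stepA value)
      (lines, false, ([] : List Int))
    let ls2 := st.2.2.reverse.foldl delStep st.1
    if !st.2.1 then PySem.List.insert ls2 (section_start + 1) ("0=" ++ value) else ls2

-- ===== PORT B =====
-- pass 1: copy lines into `out` up to and including the header line
def bScan (header : String) : List String → Option (List String × List String)
  | [] => none
  | l :: ls =>
    if PySem.Str.strip l == header then some ([l], ls)
    else
      match bScan header ls with
      | none => none
      | some pr => some (l :: pr.1, pr.2)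

-- pass 2: rewrite/keep/drop each line of the section; after a bracket line the rest is copied
def bBody (value : String) : List String → List String × Bool
  | [] => ([], false)
  | l :: ls =>
    if pvBracket l then (l :: ls, false)
    else
      let r := bBody value ls
      if pvSkip l then (l :: r.1, r.2)
      else if pvZero l then (("0=" ++ value) :: r.1, true)
      else if pvDig l then r
      else (l :: r.1, r.2)

def ensure_list_first_alt (lines : List String) (section_ : String) (value : String) : List String :=
  let header := "[" ++ section_ ++ "]"
  match bScan header lines with
  | none =>
    if (!lines.isEmpty) && !(PySem.Str.strip (PySem.List.pyGetD lines (-1) "") == "") then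
      lines ++ ["", header, "0=" ++ value]
    else
      lines ++ [header, "0=" ++ value]
  | some pr =>
    let r := bBody value pr.2
    if r.2 then pr.1 ++ r.1 else pr.1 ++ ("0=" ++ value) :: r.1

-- ===== PRECONDITION & SPEC =====
def Spec_ensure_list_first (lines : List String) (section_ : String) (value : String) (out : List String) : Prop := out = ensure_list_first_alt lines section_ value
instance (lines : List String) (section_ : String) (value : String) (out : List String) : Decidable (Spec_ensure_list_first lines section_ value out) := by unfold Spec_ensure_list_first; infer_instance

-- ===== CLAIM (what is proved, stated in full; the proofs are below) =====
def Claim_equal_ensure_list_first : Prop := ∀ (lines : List String) (section_ : String) (value : String), Dom_ensure_list_first lines section_ value → Spec_ensure_list_first lines section_ value (ensure_list_first lines section_ value)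

-- ===== LEMMAS AND PROOFS =====
-- proof-only notions: one line's fate under A (replacement, delete flag), the lines B
-- keeps for one input line, and the indices A collects for deletion

def pvRepl (value l : String) : String := if !pvSkip l && pvZero l then "0=" ++ value else l

def pvG (value l : String) : List String :=
  if pvSkip l then [l] else if pvZero l then ["0=" ++ value] else if pvDig l then [] else [l]

def pvAnyZero (mid : List String) : Bool := mid.any (fun l => !pvSkip l && pvZero l)

def pvDel (l : String) : Bool := !pvSkip l && !pvZero l && pvDig l

def pvRemIdx : List String → Int → List Int
  | [], _ => []
  | x :: xs, i => if pvDel x then i :: pvRemIdx xs (i + 1) else pvRemIdx xs (i + 1)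

theorem pv_pyGetD_append_cons (front t : List String) (x d : String) :
    PySem.List.pyGetD (front ++ x :: t) (front.length : Int) d = x := by
  rw [PySem.List.pyGetD_natCast]; simp

theorem pv_pySetD_append_cons (front t : List String) (x v : String) :
    PySem.List.pySetD (front ++ x :: t) (front.length : Int) v = front ++ v :: t := by
  rw [PySem.List.pySetD_natCast]
  simp [List.set_append_right]

theorem pv_delStep_append_cons (front t : List String) (x : String) :
    delStep (front ++ x :: t) (front.length : Int) = front ++ t := by
  have h : front.length < (front ++ x :: t).length := by simp
  rw [delStep, PySem.List.pop?_natCast _ _ h]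
  simp [List.eraseIdx_append]

theorem bScan_none (header : String) (lines : List String)
    (h : ∀ l ∈ lines, (PySem.Str.strip l == header) = false) :
    bScan header lines = none := by
  induction lines with
  | nil => rfl
  | cons l ls ih =>
    simp only [bScan, h l (by simp)]
    rw [ih (fun x hx => h x (by simp [hx]))]
    simp

theorem bScan_split (header : String) (pre : List String) (h0 : String) (rest : List String)
    (hpre : ∀ l ∈ pre, (PySem.Str.strip l == header) = false)
    (hh : (PySem.Str.strip h0 == header) = true) :
    bScan header (pre ++ h0 :: rest) = some (pre ++ [h0], rest) := by
  induction pre with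
  | nil => simp [bScan, hh]
  | cons l ls ih =>
    simp only [List.cons_append, bScan, hpre l (by simp)]
    rw [ih (fun x hx => hpre x (by simp [hx]))]
    simp

theorem fsStart_none (header : String) (lines : List String)
    (h : ∀ l ∈ lines, (PySem.Str.strip l == header) = false) :
    ∀ i, fsStart header lines i = -1 := by
  induction lines with
  | nil => intro i; rfl
  | cons l ls ih =>
    intro i
    simp only [fsStart, h l (by simp)]
    exact ih (fun x hx => h x (by simp [hx])) (i + 1)

theorem fsStart_split (header : String) (pre : List String) (h0 : String) (rest : List String)
    (hpre : ∀ l ∈ pre, (PySem.Str.strip l == header) = false)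
    (hh : (PySem.Str.strip h0 == header) = true) :
    ∀ i, fsStart header (pre ++ h0 :: rest) i = i + pre.length := by
  induction pre with
  | nil => intro i; simp [fsStart, hh]
  | cons l ls ih =>
    intro i
    simp only [List.cons_append, fsStart, hpre l (by simp)]
    rw [ih (fun x hx => hpre x (by simp [hx])) (i + 1)]
    simp only [List.length_cons]
    push_cast
    ring

theorem fsEnd_split' (mid : List String)
    (hmid : ∀ l ∈ mid, pvBracket l = false) :
    ∀ (front post : List String),
    (post = [] ∨ ∃ b t, post = b :: t ∧ pvBracket b = true) →
    fsEnd (front ++ mid ++ post)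
        (PySem.List.pyRange (front.length : Int) (PySem.List.len (front ++ mid ++ post)) 1)
        (PySem.List.len (front ++ mid ++ post))
      = (front.length : Int) + mid.length := by
  induction mid with
  | nil =>
    intro front post hpost
    rcases hpost with rfl | ⟨b, t, rfl, hb⟩
    · rw [PySem.List.pyRange_one_eq_nil (by simp)]
      simp [fsEnd]
    · rw [PySem.List.pyRange_one_cons (by simp)]
      simp only [fsEnd, List.append_nil]
      rw [pv_pyGetD_append_cons]
      simp [hb]
  | cons x xs ih =>
    intro front post hpost
    have hlt : (front.length : Int) < PySem.List.len (front ++ x :: xs ++ post) := by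
      simp; omega
    rw [PySem.List.pyRange_one_cons hlt]
    simp only [fsEnd]
    have hget : PySem.List.pyGetD (front ++ (x :: xs) ++ post) ((front.length : Int)) "" = x := by
      rw [List.append_assoc, List.cons_append]
      exact pv_pyGetD_append_cons front (xs ++ post) x ""
    rw [hget, hmid x (by simp)]
    have := ih (fun l hl => hmid l (by simp [hl])) (front ++ [x]) post hpost
    simp only [List.append_assoc, List.cons_append, List.nil_append, List.length_append,
      List.length_cons, List.length_nil] at this ⊢
    rw [show ((front.length : Int) + 1) = ((front.length + 1 : Nat) : Int) by push_cast; ring]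
    rw [this]
    push_cast; ring

theorem bBody_split (value : String) (mid post : List String)
    (hmid : ∀ l ∈ mid, pvBracket l = false)
    (hpost : post = [] ∨ ∃ b t, post = b :: t ∧ pvBracket b = true) :
    bBody value (mid ++ post) = (mid.flatMap (pvG value) ++ post, pvAnyZero mid) := by
  induction mid with
  | nil =>
    rcases hpost with rfl | ⟨b, t, rfl, hb⟩
    · rfl
    · simp [bBody, hb, pvAnyZero]
  | cons x xs ih =>
    have hx : pvBracket x = false := hmid x (by simp)
    have ih' := ih (fun l hl => hmid l (by simp [hl]))
    simp only [List.cons_append, bBody, hx, ih', pvG, pvAnyZero, List.flatMap_cons,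
      List.any_cons, Bool.false_eq_true, if_false]
    by_cases hs : pvSkip x
    · simp [hs]
    · by_cases hz : pvZero x
      · simp [hs, hz]
      · by_cases hdg : pvDig x
        · simp [hs, hz, hdg]
        · simp [hs, hz, hdg]

theorem loopA (value : String) (mid : List String) :
    ∀ (front post : List String) (rep : Bool) (rem : List Int),
    (PySem.List.pyRange (front.length : Int) ((front.length : Int) + mid.length) 1).foldl
        (stepA value) (front ++ mid ++ post, rep, rem)
      = (front ++ mid.map (pvRepl value) ++ post, rep || pvAnyZero mid,
         rem ++ pvRemIdx mid front.length) := by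
  induction mid with
  | nil =>
    intro front post rep rem
    rw [show ((front.length : Int) + ([] : List String).length) = (front.length : Int) by simp]
    rw [PySem.List.pyRange_one_eq_nil le_rfl]
    simp [pvAnyZero, pvRemIdx]
  | cons x xs ih =>
    intro front post rep rem
    rw [PySem.List.pyRange_one_cons (by simp)]
    simp only [List.foldl_cons]
    have hstep : stepA value (front ++ (x :: xs) ++ post, rep, rem) (front.length : Int)
        = (front ++ pvRepl value x :: (xs ++ post),
           rep || (!pvSkip x && pvZero x),
           rem ++ (if pvDel x then [(front.length : Int)] else [])) := by
      unfold stepA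
      simp only [List.append_assoc, List.cons_append]
      rw [pv_pyGetD_append_cons]
      by_cases hs : pvSkip x
      · simp [hs, pvRepl, pvDel]
      · by_cases hz : pvZero x
        · rw [pv_pySetD_append_cons]
          simp [hs, hz, pvRepl, pvDel]
        · by_cases hd : pvDig x
          · simp [hs, hz, hd, pvRepl, pvDel]
          · simp [hs, hz, hd, pvRepl, pvDel]
    rw [hstep]
    have heq : front ++ pvRepl value x :: (xs ++ post) = (front ++ [pvRepl value x]) ++ xs ++ post := by
      simp
    rw [heq]
    rw [show ((front.length : Int) + ((x :: xs).length : Nat))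
        = (((front ++ [pvRepl value x]).length : Int) + (xs.length : Nat)) by
      simp; ring]
    rw [show ((front.length : Int) + 1) = (((front ++ [pvRepl value x]).length : Int)) by simp]
    rw [ih (front ++ [pvRepl value x]) post _ _]
    simp only [List.append_assoc, List.cons_append, List.nil_append, List.length_append,
      List.length_cons, List.length_nil, List.map_cons, pvAnyZero, List.any_cons, pvRemIdx]
    have : (((front.length : Int) + 1)) = (((front.length + 1 : Nat)) : Int) := by push_cast; ring
    rw [this]
    by_cases hd : pvDel x <;> simp [hd, Bool.or_assoc]

theorem delFold (value : String) (mid : List String) :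
    ∀ front post : List String,
    (pvRemIdx mid (front.length : Int)).reverse.foldl delStep
        (front ++ mid.map (pvRepl value) ++ post)
      = front ++ mid.flatMap (pvG value) ++ post := by
  induction mid with
  | nil => intro front post; simp [pvRemIdx]
  | cons x xs ih =>
    intro front post
    by_cases hd : pvDel x
    · have hd' : (pvSkip x = false ∧ pvZero x = false) ∧ pvDig x = true := by
        simpa [pvDel] using hd
      have hx : pvRepl value x = x := by simp [pvRepl, hd'.1.2]
      have hg : pvG value x = [] := by simp [pvG, hd'.1.1, hd'.1.2, hd'.2]
      simp only [pvRemIdx, hd, if_pos, List.reverse_cons, List.foldl_append, List.foldl_cons,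
        List.foldl_nil, List.map_cons, List.flatMap_cons, hx, hg, List.nil_append]
      rw [show ((front.length : Int) + 1) = (((front ++ [x]).length : Nat) : Int) by simp]
      have hstep := ih (front ++ [x]) post
      simp only [List.append_assoc, List.cons_append, List.nil_append] at hstep ⊢
      rw [hstep]
      exact pv_delStep_append_cons front (xs.flatMap (pvG value) ++ post) x
    · have hg : pvG value x = [pvRepl value x] := by
        by_cases hs : pvSkip x
        · simp [pvG, pvRepl, hs]
        · by_cases hz : pvZero x
          · simp [pvG, pvRepl, hs, hz]
          · have hdig : pvDig x = false := by simpa [pvDel, hs, hz] using hd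
            simp [pvG, pvRepl, hs, hz, hdig]
      simp only [pvRemIdx, hd, List.map_cons, List.flatMap_cons, hg]
      rw [show ((front.length : Int) + 1) = (((front ++ [pvRepl value x]).length : Nat) : Int) by simp]
      have hstep := ih (front ++ [pvRepl value x]) post
      simp only [List.append_assoc, List.cons_append, List.nil_append, if_false,
        Bool.false_eq_true] at hstep ⊢
      rw [hstep]

theorem main_eq : ∀ (lines : List String) (section_ value : String),
    ensure_list_first lines section_ value = ensure_list_first_alt lines section_ value := by
  intro lines section_ value
  simp only [ensure_list_first, ensure_list_first_alt, find_section]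
  set header := "[" ++ section_ ++ "]" with hheader
  have hsplit := List.takeWhile_append_dropWhile
    (p := fun l => !(PySem.Str.strip l == header)) (l := lines)
  cases hd : List.dropWhile (fun l => !(PySem.Str.strip l == header)) lines with
  | nil =>
    have hall : ∀ l ∈ lines, (PySem.Str.strip l == header) = false := by
      intro l hl
      have := List.dropWhile_eq_nil_iff.mp hd l hl
      simpa using this
    rw [fsStart_none header lines hall 0, bScan_none header lines hall]
    simp only [show ((-1 : Int) == -1) = true from rfl, if_true]
    split_ifs <;> simp
  | cons h0 rest =>
    have hpre : ∀ l ∈ lines.takeWhile (fun l => !(PySem.Str.strip l == header)),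
        (PySem.Str.strip l == header) = false := by
      intro l hl
      have := List.mem_takeWhile_imp hl
      simpa using this
    have hh0 : (PySem.Str.strip h0 == header) = true := by
      have := List.head?_dropWhile_not (fun l => !(PySem.Str.strip l == header)) lines
      rw [hd] at this
      simpa using this
    have hlines : lines = lines.takeWhile (fun l => !(PySem.Str.strip l == header)) ++ h0 :: rest := by
      conv_lhs => rw [← hsplit]
      rw [hd]
    set pre := lines.takeWhile (fun l => !(PySem.Str.strip l == header)) with hpredef
    -- split the section body at the first bracket line
    have hsplit2 := List.takeWhile_append_dropWhile (p := fun l => !(pvBracket l)) (l := rest)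
    set mid := rest.takeWhile (fun l => !(pvBracket l)) with hmiddef
    set post := rest.dropWhile (fun l => !(pvBracket l)) with hpostdef
    have hmid : ∀ l ∈ mid, pvBracket l = false := by
      intro l hl
      have := List.mem_takeWhile_imp hl
      simpa using this
    have hpost : post = [] ∨ ∃ b t, post = b :: t ∧ pvBracket b = true := by
      cases hp : post with
      | nil => exact Or.inl rfl
      | cons b t =>
        refine Or.inr ⟨b, t, rfl, ?_⟩
        have := List.head?_dropWhile_not (fun l => !(pvBracket l)) rest
        rw [← hpostdef, hp] at this
        simpa using this
    have hrest : rest = mid ++ post := hsplit2.symm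
    rw [hlines, hrest]
    rw [fsStart_split header pre h0 (mid ++ post) hpre hh0 0]
    rw [show ((0 : Int) + pre.length) = (pre.length : Int) by ring]
    rw [if_neg (by simp)]
    rw [if_pos (by omega : ((pre.length : Int)) ≥ 0)]
    rw [bScan_split header pre h0 (mid ++ post) hpre hh0]
    simp only []
    rw [bBody_split value mid post hmid hpost]
    have hfr : ((pre.length : Int) + 1) = (((pre ++ [h0]).length : Nat) : Int) := by simp
    have hassoc : pre ++ h0 :: (mid ++ post) = (pre ++ [h0]) ++ mid ++ post := by simp
    rw [hassoc, hfr]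
    rw [fsEnd_split' mid hmid (pre ++ [h0]) post hpost]
    rw [loopA value mid (pre ++ [h0]) post false []]
    simp only [Bool.false_or, List.nil_append]
    rw [delFold value mid (pre ++ [h0]) post]
    by_cases hz : pvAnyZero mid
    · simp only [hz, Bool.not_true, Bool.false_eq_true, if_false, if_true]
      simp
    · simp only [Bool.not_eq_true] at hz
      simp only [hz, Bool.not_false, if_true, Bool.false_eq_true, if_false]
      rw [PySem.List.insert_natCast _ _ _ (by simp)]
      rw [show ((pre ++ [h0]) ++ mid.flatMap (pvG value) ++ post).take (pre ++ [h0]).length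
          = pre ++ [h0] by rw [List.append_assoc]; exact List.take_left]
      rw [show ((pre ++ [h0]) ++ mid.flatMap (pvG value) ++ post).drop (pre ++ [h0]).length
          = mid.flatMap (pvG value) ++ post by rw [List.append_assoc]; exact List.drop_left]

-- ===== VERDICT (by name: the statement is the Claim_ definition above) =====
theorem ensure_list_first_spec : Claim_equal_ensure_list_first := by
  intro lines section_ value _
  unfold Spec_ensure_list_first
  exact main_eq lines section_ value
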